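-- pv_equiv track=rewrite | github.com/skailasa/practice | ctc/ch05-bit-manipulation/6-conversion.py | number_of_flips
-- ===== SOURCE A (Python) =====
-- def check_current_bit_1(num):
--     if (num & 1) & 1 == 1:
--         return True
--     return False
--
-- def number_of_flips(num1, num2):
--
--     res = num1 & num2
--     count = 0
--
--     while res != 0:
--         if check_current_bit_1(res):
--             count += 1
--
--         res = res >> 1
--
--     return count
-- ===== SOURCE B (Python) =====
-- def number_of_flips(num1, num2):
--     res = num1 & num2
--     count = 0
--     while res != 0:
--         res &= res - 1
--         count += 1
--     return count
-- ===== Notes on version B (the rewrite author's own statement) =====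
-- stated objective: idiomatic
-- what changed: Replaces the per-bit-position scan (shift right once per bit, testing the low bit with a helper) by Brian Kernighan's loop that clears the lowest set bit (res &= res - 1) once per SET bit, dropping the check_current_bit_1 helper.
import Mathlib
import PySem

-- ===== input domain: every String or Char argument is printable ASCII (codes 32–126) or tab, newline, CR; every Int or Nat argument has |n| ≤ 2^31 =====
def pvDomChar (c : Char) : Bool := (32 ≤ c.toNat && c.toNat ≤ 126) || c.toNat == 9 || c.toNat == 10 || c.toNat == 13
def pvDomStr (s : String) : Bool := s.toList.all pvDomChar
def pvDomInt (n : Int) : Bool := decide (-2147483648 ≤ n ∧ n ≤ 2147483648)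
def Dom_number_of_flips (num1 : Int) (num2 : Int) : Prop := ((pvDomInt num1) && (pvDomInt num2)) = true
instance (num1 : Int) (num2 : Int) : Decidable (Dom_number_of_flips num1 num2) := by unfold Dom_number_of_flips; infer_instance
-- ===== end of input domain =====

-- B replaces A's per-bit-position scan (shift + low-bit test helper) by Kernighan's
-- clear-lowest-set-bit loop (res &= res - 1), one iteration per set bit.


-- ===== PORT A =====
def check_current_bit_1 (num : Int) : Bool :=
  if PySem.Int.band (PySem.Int.band num 1) 1 = 1 then true else false

-- the while loop of A; for res < 0 Python diverges (excluded by Pre_), the guard only makes it total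
def numFlipsLoopA (res : Int) (count : Int) : Int :=
  if res = 0 then count
  else if _h : res < 0 then count  -- unreachable under Pre_: Python loops forever here
  else numFlipsLoopA (res >>> (1 : Nat)) (if check_current_bit_1 res then count + 1 else count)
termination_by res.toNat
decreasing_by
  have h0 : 0 < res := by omega
  simp only [Int.shiftRight_eq_div_pow, pow_one]
  omega

def number_of_flips (num1 : Int) (num2 : Int) : Int :=
  numFlipsLoopA (PySem.Int.band num1 num2) 0

-- ===== PORT B =====
-- the while loop of B; for res < 0 Python diverges (excluded by Pre_), the guard only makes it total
def numFlipsLoopB (res : Int) (count : Int) : Int :=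
  if res = 0 then count
  else if _h : res < 0 then count  -- unreachable under Pre_: Python loops forever here
  else numFlipsLoopB (PySem.Int.band res (res - 1)) (count + 1)
termination_by res.toNat
decreasing_by
  have h0 : 0 < res := by omega
  have h1 : PySem.Int.band res (res - 1) = ((res.toNat &&& (res - 1).toNat : Nat) : Int) :=
    PySem.Int.band_of_nonneg (by omega) (by omega)
  have h2 : res.toNat &&& (res - 1).toNat ≤ (res - 1).toNat := Nat.and_le_right
  omega

def number_of_flips_alt (num1 : Int) (num2 : Int) : Int :=
  numFlipsLoopB (PySem.Int.band num1 num2) 0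

-- ===== PRECONDITION & SPEC =====
-- Pre_ excludes num1 & num2 < 0 (both num1 and num2 negative): there BOTH Pythons loop forever
-- (A keeps shifting a negative number, B keeps clearing bits of an infinite two's-complement tail).
def Pre_number_of_flips (num1 : Int) (num2 : Int) : Prop := 0 ≤ PySem.Int.band num1 num2
instance (num1 : Int) (num2 : Int) : Decidable (Pre_number_of_flips num1 num2) := by unfold Pre_number_of_flips; infer_instance

def pvWitness_number_of_flips : Int × Int := (13, 7)

def Spec_number_of_flips (num1 : Int) (num2 : Int) (out : Int) : Prop := out = number_of_flips_alt num1 num2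
instance (num1 : Int) (num2 : Int) (out : Int) : Decidable (Spec_number_of_flips num1 num2 out) := by unfold Spec_number_of_flips; infer_instance

-- ===== CLAIM (what is proved, stated in full; the proofs are below) =====
def Claim_equal_number_of_flips : Prop := ∀ (num1 : Int) (num2 : Int), Dom_number_of_flips num1 num2 → Pre_number_of_flips num1 num2 → Spec_number_of_flips num1 num2 (number_of_flips num1 num2)

-- ===== LEMMAS AND PROOFS =====

lemma and_mod_two (n m : Nat) : (n &&& m) % 2 = n % 2 * (m % 2) := by
  rw [← Nat.and_one_is_mod (n &&& m), Nat.and_assoc, Nat.and_one_is_mod m]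
  rcases Nat.mod_two_eq_zero_or_one m with hm | hm <;> rw [hm]
  · simp [Nat.and_zero]
  · rw [Nat.and_one_is_mod, Nat.mul_one]

-- A's loop counts the bits: numFlipsLoopA ↑m c = c + popcount m
lemma loopA_eq (m : Nat) : ∀ c : Int, numFlipsLoopA (m : Int) c = c + (PySem.Int.bitCount (m : Int) : Int) := by
  induction m using Nat.strong_induction_on with
  | _ m ih =>
    intro c
    rw [numFlipsLoopA]
    by_cases h0 : m = 0
    · subst h0; simp [PySem.Int.bitCount]
    · have hm : 0 < m := Nat.pos_of_ne_zero h0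
      have hcast : ((m : Int) = 0) = False := by simp [h0]
      simp only [hcast, if_false, show ¬((m : Int) < 0) by omega, dif_neg, not_false_iff]
      have hsh : ((m : Int) >>> (1 : Nat)) = ((m / 2 : Nat) : Int) := by
        rw [Int.shiftRight_eq_div_pow, pow_one]; exact Eq.symm (Nat.ToInt.div_congr rfl rfl)
      rw [hsh, ih (m / 2) (by omega)]
      have hbc := PySem.Int.bitCount_natCast hm
      have hband2 : PySem.Int.band (PySem.Int.band (m : Int) 1) 1 = ((m % 2 : Nat) : Int) := by
        rw [show ((1:Int) = ((1:Nat):Int)) from rfl, PySem.Int.band_natCast, PySem.Int.band_natCast,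
          Nat.and_assoc, Nat.and_self, Nat.and_one_is_mod]
      have hbit : check_current_bit_1 (m : Int) = decide (m % 2 = 1) := by
        rw [check_current_bit_1, hband2]
        rcases Nat.mod_two_eq_zero_or_one m with h | h <;> simp [h]
      rcases Nat.mod_two_eq_zero_or_one m with h | h
      · simp only [hbit, h, hbc]
        push_cast
        simp
      · simp only [hbit, h, hbc]
        push_cast
        simp
        omega

-- Kernighan's step clears exactly one set bit
lemma kernighan_bitCount (m : Nat) (hm : 0 < m) :
    PySem.Int.bitCount ((m &&& (m - 1) : Nat) : Int) + 1 = PySem.Int.bitCount (m : Int) := by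
  induction m using Nat.strong_induction_on with
  | _ m ih =>
    have hdiv : (m &&& (m - 1)) / 2 = m / 2 &&& (m - 1) / 2 := Nat.and_div_two
    have hmod : (m &&& (m - 1)) % 2 = m % 2 * ((m - 1) % 2) := and_mod_two m (m - 1)
    rcases Nat.mod_two_eq_zero_or_one m with he | ho
    · -- m even: m &&& (m-1) = 2 * (m/2 &&& (m/2 - 1)), recurse on m/2
      have hk : 0 < m / 2 := by omega
      have hm1d : (m - 1) / 2 = m / 2 - 1 := by omega
      rw [he, Nat.zero_mul] at hmod
      have hval : m &&& (m - 1) = 2 * (m / 2 &&& (m / 2 - 1)) := by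
        have := Nat.div_add_mod (m &&& (m - 1)) 2
        rw [hdiv, hm1d] at this
        omega
      have hrec := ih (m / 2) (by omega) hk
      have hbcm := PySem.Int.bitCount_natCast (show 0 < m from hm)
      have hdbl : PySem.Int.bitCount ((2 * (m / 2 &&& (m / 2 - 1)) : Nat) : Int)
          = PySem.Int.bitCount ((m / 2 &&& (m / 2 - 1) : Nat) : Int) := by
        by_cases hz : m / 2 &&& (m / 2 - 1) = 0
        · rw [hz]
        · have hpos : 0 < 2 * (m / 2 &&& (m / 2 - 1)) := by omega
          have h2 := PySem.Int.bitCount_natCast hpos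
          have e1 : (2 * (m / 2 &&& (m / 2 - 1))) % 2 = 0 := by omega
          have e2 : (2 * (m / 2 &&& (m / 2 - 1))) / 2 = m / 2 &&& (m / 2 - 1) := by omega
          rw [e1, e2] at h2
          omega
      rw [hval, hdbl]
      omega
    · -- m odd: m &&& (m-1) = m - 1, which just drops the low 1-bit
      have h1 : (m - 1) % 2 = 0 := by omega
      have h1d : (m - 1) / 2 = m / 2 := by omega
      rw [ho, h1] at hmod
      have hval : m &&& (m - 1) = m - 1 := by
        have := Nat.div_add_mod (m &&& (m - 1)) 2
        rw [hdiv, h1d, Nat.and_self] at this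
        omega
      have hbcm := PySem.Int.bitCount_natCast (show 0 < m from hm)
      rw [hval]
      by_cases hz : m - 1 = 0
      · rw [hz]
        have h1m : m = 1 := by omega
        subst h1m
        decide
      · have hbc1 := PySem.Int.bitCount_natCast (show 0 < m - 1 by omega)
        rw [h1, h1d] at hbc1
        rw [ho] at hbcm
        omega

-- B's loop counts the bits too
lemma loopB_eq (m : Nat) : ∀ c : Int, numFlipsLoopB (m : Int) c = c + (PySem.Int.bitCount (m : Int) : Int) := by
  induction m using Nat.strong_induction_on with
  | _ m ih =>
    intro c
    rw [numFlipsLoopB]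
    by_cases h0 : m = 0
    · subst h0; simp [PySem.Int.bitCount]
    · have hm : 0 < m := Nat.pos_of_ne_zero h0
      have hcast : ((m : Int) = 0) = False := by simp [h0]
      simp only [hcast, if_false, show ¬((m : Int) < 0) by omega, dif_neg, not_false_iff]
      have hband : PySem.Int.band (m : Int) ((m : Int) - 1) = ((m &&& (m - 1) : Nat) : Int) := by
        have : ((m : Int) - 1) = ((m - 1 : Nat) : Int) := by omega
        rw [this, PySem.Int.band_natCast]
      have hlt : m &&& (m - 1) < m := by
        have := Nat.and_le_right (n := m) (m := m - 1); omega
      rw [hband, ih _ hlt]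
      have := kernighan_bitCount m hm
      omega

-- ===== VERDICT (by name: the statement is the Claim_ definition above) =====
theorem number_of_flips_spec : Claim_equal_number_of_flips := by
  intro num1 num2 _hdom hpre
  unfold Spec_number_of_flips number_of_flips number_of_flips_alt
  unfold Pre_number_of_flips at hpre
  set r := PySem.Int.band num1 num2 with hr
  have : r = ((r.toNat : Nat) : Int) := by omega
  rw [this, loopA_eq, loopB_eq]
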